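-- pv_equiv track=rewrite | github.com/MolfarUA/CodeWars_Solutions | 7 kyu/Pair Zeros/solution.py | pair_zeros
-- ===== SOURCE A (Python) =====
-- def pair_zeros(arr):
--     l=[]
--     z=0
--     for i in arr:
--         if i==0:
--             z+=1
--             if z%2==0:
--                 continue
--             else:
--                 l.append(i)
--         else:
--             l.append(i)
--     return l
-- ===== SOURCE B (Python) =====
-- def pair_zeros(arr):
--     zp = [j for j, x in enumerate(arr) if x == 0]
--     drop = {j for k, j in enumerate(zp) if k % 2 == 1}
--     return [x for j, x in enumerate(arr) if j not in drop]
-- ===== Notes on version B (the rewrite author's own statement) =====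
-- stated objective: alternative
-- what changed: Replaces A's single streaming pass with a parity counter by an index-table approach: first collect the positions of all zeros, mark every second zero position as dropped, then rebuild the list by position filtering.
import Mathlib
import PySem

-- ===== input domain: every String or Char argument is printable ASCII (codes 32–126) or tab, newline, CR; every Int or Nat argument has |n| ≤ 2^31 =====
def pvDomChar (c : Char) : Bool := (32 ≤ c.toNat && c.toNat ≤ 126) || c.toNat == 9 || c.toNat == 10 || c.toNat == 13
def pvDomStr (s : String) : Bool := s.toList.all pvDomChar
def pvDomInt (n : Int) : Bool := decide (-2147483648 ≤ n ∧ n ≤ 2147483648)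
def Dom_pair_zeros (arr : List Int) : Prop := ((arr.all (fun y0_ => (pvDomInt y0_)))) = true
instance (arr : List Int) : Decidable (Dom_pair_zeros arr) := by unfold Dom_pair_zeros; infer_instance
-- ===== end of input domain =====

-- B rebuilds the list from a precomputed table of zero positions instead of A's streaming
-- parity counter; an alternative decomposition of the same O(n) task (not claimed faster).

-- ===== PORT A =====
-- A: one pass, parity counter z, append kept elements.
def pair_zeros (arr : List Int) : List Int :=
  (arr.foldl (fun (st : List Int × Int) i =>
      if i == 0 then
        let z := st.2 + 1
        if PySem.Int.mod z 2 == 0 then (st.1, z)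
        else (st.1 ++ [i], z)
      else (st.1 ++ [i], st.2)) (([] : List Int), (0 : Int))).1

-- ===== PORT B =====
-- B: zero-position table, drop-set of every second zero position, position-filtered rebuild.
def pair_zeros_alt (arr : List Int) : List Int :=
  let zp := ((PySem.List.enumerate arr 0).filter (fun p => p.2 == 0)).map (fun p => p.1)
  let drop := PySem.Set.ofList
    (((PySem.List.enumerate zp 0).filter (fun q => PySem.Int.mod q.1 2 == 1)).map (fun q => q.2))
  ((PySem.List.enumerate arr 0).filter (fun p => !(PySem.Set.contains drop p.1))).map (fun p => p.2)

-- ===== PRECONDITION & SPEC =====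
def Spec_pair_zeros (arr : List Int) (out : List Int) : Prop := out = pair_zeros_alt arr
instance (arr : List Int) (out : List Int) : Decidable (Spec_pair_zeros arr out) := by unfold Spec_pair_zeros; infer_instance

-- ===== CLAIM (what is proved, stated in full; the proofs are below) =====
def Claim_equal_pair_zeros : Prop := ∀ (arr : List Int), Dom_pair_zeros arr → Spec_pair_zeros arr (pair_zeros arr)

-- ===== LEMMAS AND PROOFS =====

-- Common reference recursion: keep a zero iff the flag says an even number of zeros was seen.
def pzGo : List Int → Bool → List Int
  | [], _ => []
  | x :: t, b =>
    if x = 0 then (if b then pzGo t false else x :: pzGo t true)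
    else x :: pzGo t b

-- zero positions of t, positions starting at s (matches B's zp comprehension)
def pzZps (s : Int) (t : List Int) : List Int :=
  ((PySem.List.enumerate t s).filter (fun p => p.2 == 0)).map (fun p => p.1)

-- every-second selection with running counter k (matches B's drop comprehension)
def pzSel (l : List Int) (k : Int) : List Int :=
  ((PySem.List.enumerate l k).filter (fun q => PySem.Int.mod q.1 2 == 1)).map (fun q => q.2)

lemma pzMod (a : Int) : PySem.Int.mod a 2 = a % 2 :=
  PySem.Int.mod_eq_emod_of_pos (by norm_num)

lemma pzZps_nil (s : Int) : pzZps s [] = [] := by simp [pzZps]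

lemma pzZps_cons (s x : Int) (t : List Int) :
    pzZps s (x :: t) = if x = 0 then s :: pzZps (s+1) t else pzZps (s+1) t := by
  by_cases hx : x = 0 <;> simp [pzZps, PySem.List.enumerate_cons, hx]

lemma pzZps_ge (s : Int) (t : List Int) : ∀ j ∈ pzZps s t, s ≤ j := by
  induction t generalizing s with
  | nil => simp [pzZps_nil]
  | cons x t ih =>
    intro j hj
    rw [pzZps_cons] at hj
    by_cases hx : x = 0
    · simp only [hx, if_true] at hj
      rcases List.mem_cons.mp hj with h | h
      · omega
      · have := ih (s+1) j h; omega
    · simp only [hx, if_false] at hj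
      have := ih (s+1) j hj; omega

lemma pzSel_nil (k : Int) : pzSel [] k = [] := by simp [pzSel]

lemma pzSel_cons (a k : Int) (l : List Int) :
    pzSel (a :: l) k =
      if PySem.Int.mod k 2 == 1 then a :: pzSel l (k+1) else pzSel l (k+1) := by
  cases hk : (PySem.Int.mod k 2 == 1) <;>
    simp only [pzSel, PySem.List.enumerate_cons, List.filter_cons, hk] <;> simp

lemma pzSel_sub (l : List Int) (k : Int) : ∀ j ∈ pzSel l k, j ∈ l := by
  induction l generalizing k with
  | nil => simp [pzSel_nil]
  | cons a l ih =>
    intro j hj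
    rw [pzSel_cons] at hj
    cases hk : (PySem.Int.mod k 2 == 1)
    · simp only [hk, Bool.false_eq_true, if_false] at hj
      exact List.mem_cons_of_mem _ (ih (k+1) j hj)
    · simp only [hk, if_true] at hj
      rcases List.mem_cons.mp hj with h | h
      · simp [h]
      · exact List.mem_cons_of_mem _ (ih (k+1) j h)

-- A's loop computes pzGo.
lemma pzA (t : List Int) : ∀ (acc : List Int) (z : Int),
    (t.foldl (fun (st : List Int × Int) i =>
      if i == 0 then
        let z := st.2 + 1
        if PySem.Int.mod z 2 == 0 then (st.1, z)
        else (st.1 ++ [i], z)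
      else (st.1 ++ [i], st.2)) (acc, z)).1
      = acc ++ pzGo t (PySem.Int.mod z 2 == 1) := by
  induction t with
  | nil => intro acc z; simp [pzGo]
  | cons x t ih =>
    intro acc z
    by_cases hx : x = 0
    · subst hx
      by_cases he : PySem.Int.mod (z+1) 2 == 0
      · have he' : (z+1) % 2 = 0 := by rw [← pzMod]; exact beq_iff_eq.mp he
        have hz1 : ((z % 2 : Int) == 1) = true := beq_iff_eq.mpr (by omega)
        have hz2 : (((z+1) % 2 : Int) == 1) = false := beq_eq_false_iff_ne.mpr (by omega)
        simp only [List.foldl_cons, beq_self_eq_true, if_true, he, ih]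
        simp [pzGo, hz1, hz2]
      · have he' : (z+1) % 2 ≠ 0 := by
          rw [← pzMod]; exact fun h => he (beq_iff_eq.mpr h)
        have hz1 : ((z % 2 : Int) == 1) = false := beq_eq_false_iff_ne.mpr (by omega)
        have hz2 : (((z+1) % 2 : Int) == 1) = true := beq_iff_eq.mpr (by omega)
        simp only [List.foldl_cons, beq_self_eq_true, if_true, he, ih]
        simp [pzGo, hz1, hz2]
    · have hx' : (x == (0:Int)) = false := by simp [hx]
      simp only [List.foldl_cons, hx', ih]
      simp [pzGo, hx]

-- B's position-filtered pass computes pzGo, given a drop set that agrees with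
-- the local selection pzSel (pzZps s t) c on all positions ≥ s.
lemma pzB (t : List Int) : ∀ (s c : Int) (D : PySem.Set Int),
    (∀ j, s ≤ j → (PySem.Set.contains D j = true ↔ j ∈ pzSel (pzZps s t) c)) →
    ((PySem.List.enumerate t s).filter (fun p => !(PySem.Set.contains D p.1))).map (fun p => p.2)
      = pzGo t (PySem.Int.mod c 2 == 1) := by
  induction t with
  | nil => intro s c D _; simp [pzGo]
  | cons x t ih =>
    intro s c D hD
    rw [PySem.List.enumerate_cons]
    by_cases hx : x = 0
    · subst hx
      rw [pzZps_cons] at hD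
      simp only [if_true] at hD
      by_cases hc' : c % 2 = 1
      · -- this zero is dropped
        have hs : PySem.Set.contains D s = true := by
          rw [hD s (le_refl s), pzSel_cons]
          simp [hc']
        have hz2 : (((c+1) % 2 : Int) == 1) = false := beq_eq_false_iff_ne.mpr (by omega)
        have hrec := ih (s+1) (c+1) D (by
          intro j hj
          rw [hD j (by omega), pzSel_cons]
          simp only [pzMod, hc', beq_self_eq_true, if_true]
          constructor
          · intro h
            rcases List.mem_cons.mp h with h | h
            · exfalso; omega
            · exact h
          · intro h; exact List.mem_cons_of_mem _ h)
        simp only [List.filter_cons, hs, Bool.not_true]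
        rw [if_neg (by simp), hrec]
        simp [pzGo, hc', hz2]
      · -- this zero is kept
        have hs : PySem.Set.contains D s = false := by
          by_contra h
          have h' : PySem.Set.contains D s = true := by
            cases hcd : PySem.Set.contains D s
            · exact absurd hcd h
            · rfl
          have hmem := (hD s (le_refl s)).mp h'
          rw [pzSel_cons] at hmem
          simp [hc'] at hmem
          have := pzZps_ge (s+1) t s (pzSel_sub _ _ _ hmem)
          omega
        have hz2 : (((c+1) % 2 : Int) == 1) = true := beq_iff_eq.mpr (by omega)
        have hrec := ih (s+1) (c+1) D (by
          intro j hj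
          rw [hD j (by omega), pzSel_cons]
          simp [hc'])
        simp only [List.filter_cons, hs, Bool.not_false, if_pos]
        rw [List.map_cons, hrec]
        simp [pzGo, hc', hz2]
    · -- nonzero element, always kept
      rw [pzZps_cons] at hD
      simp only [hx, if_false] at hD
      have hs : PySem.Set.contains D s = false := by
        by_contra h
        have h' : PySem.Set.contains D s = true := by
          cases hcd : PySem.Set.contains D s
          · exact absurd hcd h
          · rfl
        have hmem := (hD s (le_refl s)).mp h'
        have := pzZps_ge (s+1) t s (pzSel_sub _ _ _ hmem)
        omega
      have hrec := ih (s+1) c D (by intro j hj; exact hD j (by omega))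
      simp only [List.filter_cons, hs, Bool.not_false, if_pos]
      rw [List.map_cons, hrec]
      simp [pzGo, hx]

lemma pz_alt_eq_go (arr : List Int) : pair_zeros_alt arr = pzGo arr false := by
  have h : pair_zeros_alt arr
      = ((PySem.List.enumerate arr 0).filter
          (fun p => !(PySem.Set.contains (PySem.Set.ofList (pzSel (pzZps 0 arr) 0)) p.1))).map
          (fun p => p.2) := rfl
  rw [h]
  have hmain := pzB arr 0 0 (PySem.Set.ofList (pzSel (pzZps 0 arr) 0)) (by
    intro j _
    constructor
    · intro hc
      have hm : j ∈ PySem.Set.ofList (pzSel (pzZps 0 arr) 0) := by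
        simpa [PySem.Set.contains] using hc
      exact (PySem.Set.mem_ofList _ _).mp hm
    · intro hm
      have : j ∈ PySem.Set.ofList (pzSel (pzZps 0 arr) 0) :=
        (PySem.Set.mem_ofList _ _).mpr hm
      simpa [PySem.Set.contains] using this)
  rw [hmain]
  rfl

lemma pz_eq_go (arr : List Int) : pair_zeros arr = pzGo arr false := by
  have h := pzA arr [] 0
  simp only [pair_zeros, h]
  rfl

-- ===== VERDICT (by name: the statement is the Claim_ definition above) =====
theorem pair_zeros_spec : Claim_equal_pair_zeros := by
  intro arr _
  unfold Spec_pair_zeros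
  rw [pz_eq_go, pz_alt_eq_go]
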